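-- pv_equiv track=rewrite | github.com/kkojae91/algorithm_prac | python_algorithm/programmers/x만큼간격이있는n개의숫자.py | solution
-- ===== SOURCE A (Python) =====
-- def solution(x, n):
--     if x > 0:
--         answer = [i for i in range(x, n*x+1, x)]
--     elif x == 0:
--         answer = [0]*n
--     else:
--         answer = [i for i in range(x, n*x-1, x)]
--
--     return answer
-- ===== SOURCE B (Python) =====
-- def solution(x, n):
--     return [x * i for i in range(1, n + 1)]
-- ===== Notes on version B (the rewrite author's own statement) =====
-- stated objective: simpler
-- what changed: B iterates over the multiplier index i = 1..n and returns x*i, removing A's three-way branch on the sign of x and its value-stepped ranges.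
import Mathlib
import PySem

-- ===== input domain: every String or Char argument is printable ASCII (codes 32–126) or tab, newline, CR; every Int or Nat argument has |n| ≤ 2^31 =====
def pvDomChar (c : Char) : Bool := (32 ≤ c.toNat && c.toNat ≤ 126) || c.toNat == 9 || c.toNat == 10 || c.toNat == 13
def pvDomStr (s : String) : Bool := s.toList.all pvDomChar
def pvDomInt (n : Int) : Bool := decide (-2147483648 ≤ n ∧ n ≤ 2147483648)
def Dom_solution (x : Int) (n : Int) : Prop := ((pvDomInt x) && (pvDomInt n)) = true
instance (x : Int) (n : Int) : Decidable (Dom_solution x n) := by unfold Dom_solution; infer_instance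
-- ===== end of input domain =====

-- B iterates over the multiplier index (x*i for i in 1..n) instead of A's sign-branched value-stepped ranges: simpler, same cost.

-- ===== PORT A =====
def solution (x : Int) (n : Int) : List Int :=
  if x > 0 then
    (PySem.List.pyRange x (n * x + 1) x).map (fun i => i)
  else if x = 0 then
    List.replicate n.toNat 0          -- [0]*n : Python repeats max(n,0) times, exactly Int.toNat
  else
    (PySem.List.pyRange x (n * x - 1) x).map (fun i => i)

-- ===== PORT B =====
def solution_alt (x : Int) (n : Int) : List Int :=
  (PySem.List.pyRange 1 (n + 1) 1).map (fun i => x * i)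

-- ===== PRECONDITION & SPEC =====
def Spec_solution (x : Int) (n : Int) (out : List Int) : Prop := out = solution_alt x n
instance (x : Int) (n : Int) (out : List Int) : Decidable (Spec_solution x n out) := by unfold Spec_solution; infer_instance

-- ===== CLAIM (what is proved, stated in full; the proofs are below) =====
def Claim_equal_solution : Prop := ∀ (x : Int) (n : Int), Dom_solution x n → Spec_solution x n (solution x n)

-- ===== LEMMAS AND PROOFS =====
theorem solution_eq_alt (x n : Int) : solution x n = solution_alt x n := by
  unfold solution solution_alt
  rw [PySem.List.pyRange_one, show (n + 1 - 1) = n by ring]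
  split_ifs with h1 h2
  · rw [PySem.List.pyRange_of_pos _ _ h1]
    by_cases hn : 1 ≤ n
    · have hlt : x < n * x + 1 := by nlinarith
      have hd : (n * x + 1 - x + x - 1) / x = n := by
        rw [show n * x + 1 - x + x - 1 = n * x by ring, Int.mul_ediv_cancel _ (by omega)]
      rw [if_pos hlt, hd]
      apply List.ext_getElem <;> simp
      intro k hk; ring
    · have : ¬ (x < n * x + 1) := by nlinarith
      rw [if_neg this]
      simp [show n.toNat = 0 by omega]
  · subst h2
    apply List.ext_getElem <;> simp
  · have hx : x < 0 := by omega
    have hneg : PySem.List.pyRange x (n * x - 1) x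
        = List.map (fun k => x + x * (k : Int))
            ((List.range (if n * x - 1 < x then ((x - (n * x - 1) + -x - 1) / -x).toNat else 0)).map (fun a => (a : Int))) := by
      simp only [PySem.List.pyRange, if_neg h2, if_neg (show ¬ (0 : Int) < x by omega)]
      simp [← List.map_eq_flatMap]
    rw [hneg]
    by_cases hn : 1 ≤ n
    · have hlt : n * x - 1 < x := by nlinarith
      have hd : (x - (n * x - 1) + -x - 1) / -x = n := by
        rw [show x - (n * x - 1) + -x - 1 = n * (-x) by ring, Int.mul_ediv_cancel _ (by omega)]
      rw [if_pos hlt, hd]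
      apply List.ext_getElem <;> simp [← List.map_eq_flatMap]
      intro k hk; ring
    · have : ¬ (n * x - 1 < x) := by nlinarith
      rw [if_neg this]
      simp [show n.toNat = 0 by omega]

-- ===== VERDICT (by name: the statement is the Claim_ definition above) =====
theorem solution_spec : Claim_equal_solution := by
  intro x n _
  unfold Spec_solution
  exact solution_eq_alt x n
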